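-- pv_equiv track=rewrite | github.com/denisangel2k2/UBB | Year 1/Semester 1/Fundamentals of Programming/LAB 4-6/init_functions.py | searchMinKey
-- ===== SOURCE A (Python) =====
-- def searchMinKey(myDict):
--     """
--     cauta cel mai mic an din toate cheile dictionarului myDict si returneaza un string de forma 01/01/anul minim
--     input : myDict - dictionar
--     output : string
--     """
--
--     minimum=""
--     for key in myDict.keys():
--         temp=key.split("/")
--         if minimum=="":
--             minimum=temp[2]
--         else:
--             if int(minimum)>int(temp[2]):
--                 minimum=temp[2]
--
--     data="01/01/"+minimum
--     return data
-- ===== SOURCE B (Python) =====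
-- def _minYear(years):
--     """Leftmost year with the smallest numeric value, by tournament reduction."""
--     if len(years) == 1:
--         return years[0]
--     mid = len(years) // 2
--     a = _minYear(years[:mid])
--     b = _minYear(years[mid:])
--     return b if int(b) < int(a) else a
--
-- def searchMinKey(myDict):
--     """
--     cauta cel mai mic an din toate cheile dictionarului myDict si returneaza
--     un string de forma 01/01/anul minim (textul original al anului).
--     """
--     years = [k.split("/")[2] for k in myDict]
--     if not years:
--         return "01/01/"
--     return "01/01/" + _minYear(years)
-- ===== Notes on version B (the rewrite author's own statement) =====
-- stated objective: alternative
-- what changed: Replaces A's stateful left-to-right running-minimum scan (with its empty-string 'no minimum yet' sentinel) by a divide-and-conquer tournament: split the year list in halves, recursively take each half's leftmost numeric minimum and combine; Pre_ additionally excludes dicts of two or more keys whose leading year fields are empty, where A returns a value only via its '' sentinel while B's int() raises.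
-- outside the precondition, e.g. on searchMinKey({'a//': 'x', 'b/c/5': 'y'}): A returns '01/01/5', B raises ValueError
import Mathlib
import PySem

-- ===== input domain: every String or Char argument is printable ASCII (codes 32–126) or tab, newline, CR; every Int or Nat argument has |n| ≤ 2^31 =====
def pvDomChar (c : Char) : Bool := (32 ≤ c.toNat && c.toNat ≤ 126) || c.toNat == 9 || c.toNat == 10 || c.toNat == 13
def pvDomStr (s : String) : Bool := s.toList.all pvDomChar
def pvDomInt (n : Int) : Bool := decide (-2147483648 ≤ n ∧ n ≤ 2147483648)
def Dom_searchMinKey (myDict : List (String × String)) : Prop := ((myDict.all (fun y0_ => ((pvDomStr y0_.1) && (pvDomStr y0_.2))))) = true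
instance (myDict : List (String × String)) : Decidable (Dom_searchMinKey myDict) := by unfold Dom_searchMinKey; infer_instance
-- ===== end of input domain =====

-- B replaces A's running-minimum scan by a divide-and-conquer tournament minimum over the year fields; alternative algorithm, same result on Pre_.


-- key.split("/")[2]  (exact under Pre_ below: every key splits into ≥ 3 fields)
def pvYear (k : String) : String :=
  PySem.List.pyGetD ((PySem.Str.split? k "/").getD []) 2 ""

-- int(y)  (exact under Pre_ below: every year field that gets compared parses)
def pvIv (y : String) : Int := (PySem.Int.ofStr? y).getD 0

-- ===== PORT A =====
-- one loop step of A: temp = key.split("/"); the first iteration (and any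
-- iteration after an empty stored year) stores temp[2] unparsed, later ones
-- replace the stored minimum when int(minimum) > int(temp[2]).
def pvStepA (minimum : String) (key : String) : String :=
  if minimum = "" then pvYear key
  else if pvIv minimum > pvIv (pvYear key) then pvYear key
  else minimum

def searchMinKey (myDict : List (String × String)) : String :=
  "01/01/" ++ (myDict.map Prod.fst).foldl pvStepA ""

-- ===== PORT B =====
-- _minYear: tournament minimum over the year strings.  Python's base case is
-- len(years) == 1; the [] case is unreachable (the entry guards it), headD ""
-- only makes the Lean recursion total there.
def pvMinYear (ys : List String) : String :=
  if ys.length ≤ 1 then ys.headD ""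
  else
    let mid := ys.length / 2
    let a := pvMinYear (ys.take mid)
    let b := pvMinYear (ys.drop mid)
    if pvIv b < pvIv a then b else a
termination_by ys.length
decreasing_by
  · simp only [List.length_take]; omega
  · simp only [List.length_drop]; omega

-- years = [k.split("/")[2] for k in myDict]; empty-guard; tournament minimum
def searchMinKey_alt (myDict : List (String × String)) : String :=
  let years := myDict.map (fun kv => pvYear kv.1)
  if years = [] then "01/01/"
  else "01/01/" ++ pvMinYear years

-- ===== PRECONDITION & SPEC =====
-- Pre_ = every key has at least 3 '/'-fields, and (unless the dict has at most
-- one key, whose year field is never parsed by either program) every year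
-- field is an int literal.  It excludes (a) inputs where A raises (IndexError
-- on temp[2], ValueError on int()) and (b) dicts of ≥ 2 keys whose leading
-- year fields are empty, on which A returns a value only because minimum==""
-- accidentally means 'no minimum yet' — there B's int() raises ValueError.
def Pre_searchMinKey (myDict : List (String × String)) : Prop :=
  (∀ kv ∈ myDict, 3 ≤ ((PySem.Str.split? kv.1 "/").getD []).length) ∧
  (myDict.length ≤ 1 ∨ ∀ kv ∈ myDict, PySem.Int.ofStr? (pvYear kv.1) ≠ none)
instance (myDict : List (String × String)) : Decidable (Pre_searchMinKey myDict) := by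
  unfold Pre_searchMinKey; infer_instance

def pvWitness_searchMinKey : (List (String × String)) := [("1/1/2000", "x"), ("2/2/07", "y")]

def Spec_searchMinKey (myDict : List (String × String)) (out : String) : Prop := out = searchMinKey_alt myDict
instance (myDict : List (String × String)) (out : String) : Decidable (Spec_searchMinKey myDict out) := by unfold Spec_searchMinKey; infer_instance

-- ===== CLAIM (what is proved, stated in full; the proofs are below) =====
def Claim_equal_searchMinKey : Prop := ∀ (myDict : List (String × String)), Dom_searchMinKey myDict → Pre_searchMinKey myDict → Spec_searchMinKey myDict (searchMinKey myDict)

-- ===== LEMMAS AND PROOFS =====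

-- the left-biased numeric minimum of two year strings (B's combiner, and the
-- step of the running minimum both programs compute)
def pvComb (m y : String) : String := if pvIv y < pvIv m then y else m

-- the leftmost numerically minimal year of a nonempty list, as a left fold
def pvRunMinY (j : String) (ys : List String) : String := ys.foldl pvComb j

def pvFirstMin (ys : List String) : String := pvRunMinY (ys.headD "") ys.tail

-- A's step, once the state parses, is the running-minimum step
theorem pvStepA_of_ne (m k : String) (hm : m ≠ "") :
    pvStepA m k = pvComb m (pvYear k) := by
  unfold pvStepA pvComb
  rw [if_neg hm]

-- A's fold, once the state is a parsing year string, is the running minimum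
theorem pvFoldA (ks : List String)
    (hks : ∀ k ∈ ks, PySem.Int.ofStr? (pvYear k) ≠ none)
    (j : String) (hj : PySem.Int.ofStr? j ≠ none) :
    ks.foldl pvStepA j = pvRunMinY j (ks.map pvYear) := by
  induction ks generalizing j with
  | nil => rfl
  | cons k ks ih =>
    have hj' : j ≠ "" := fun h => hj (by rw [h]; rfl)
    rw [List.foldl_cons, pvStepA_of_ne _ _ hj', List.map_cons, pvRunMinY, List.foldl_cons]
    have hks' : ∀ x ∈ ks, PySem.Int.ofStr? (pvYear x) ≠ none :=
      fun x hx => hks x (List.mem_cons_of_mem _ hx)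
    by_cases h : pvIv (pvYear k) < pvIv j
    · rw [pvComb, if_pos h]
      exact ih hks' (pvYear k) (hks k List.mem_cons_self)
    · rw [pvComb, if_neg h]
      exact ih hks' j hj

theorem pvComb_assoc (a b c : String) :
    pvComb (pvComb a b) c = pvComb a (pvComb b c) := by
  unfold pvComb
  split_ifs <;> first | rfl | omega

theorem pvFoldComb_shift (rt : List String) :
    ∀ (r0 m : String), (r0 :: rt).foldl pvComb m = pvComb m (rt.foldl pvComb r0) := by
  induction rt with
  | nil => intro r0 m; rfl
  | cons r1 rt ih =>
    intro r0 m
    rw [List.foldl_cons, ih r1 (pvComb m r0), pvComb_assoc, ← ih r1 r0, List.foldl_cons]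

theorem pvFirstMin_append (l r : List String) (hl : l ≠ []) (hr : r ≠ []) :
    pvFirstMin (l ++ r) = pvComb (pvFirstMin l) (pvFirstMin r) := by
  obtain ⟨y, t, rfl⟩ := List.exists_cons_of_ne_nil hl
  obtain ⟨r0, rt, rfl⟩ := List.exists_cons_of_ne_nil hr
  show pvRunMinY y (t ++ r0 :: rt) = pvComb (pvRunMinY y t) (pvRunMinY r0 rt)
  rw [pvRunMinY, List.foldl_append]
  exact pvFoldComb_shift rt r0 _

-- the tournament minimum is the leftmost numeric minimum (no hypotheses needed:
-- pvComb is associative outright)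
theorem pvMinYear_eq : ∀ (n : Nat) (ys : List String), ys.length ≤ n → ys ≠ [] →
    pvMinYear ys = pvFirstMin ys := by
  intro n
  induction n with
  | zero =>
    intro ys h hne
    cases ys with
    | nil => exact absurd rfl hne
    | cons y t => simp at h
  | succ n ih =>
    intro ys hlen hne
    rw [pvMinYear]
    by_cases h1 : ys.length ≤ 1
    · rw [if_pos h1]
      cases ys with
      | nil => exact absurd rfl hne
      | cons y t =>
        have : t = [] := by
          cases t with
          | nil => rfl
          | cons a b => simp at h1
        subst this
        rfl
    · rw [if_neg h1]
      have hlb : 1 ≤ ys.length / 2 ∧ ys.length / 2 < ys.length := by omega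
      have htne : ys.take (ys.length / 2) ≠ [] := by
        intro h
        have := congrArg List.length h
        simp only [List.length_take, List.length_nil] at this
        omega
      have hdne : ys.drop (ys.length / 2) ≠ [] := by
        intro h
        have := congrArg List.length h
        simp only [List.length_drop, List.length_nil] at this
        omega
      have e1 := ih (ys.take (ys.length / 2))
        (by simp only [List.length_take]; omega) htne
      have e2 := ih (ys.drop (ys.length / 2))
        (by simp only [List.length_drop]; omega) hdne
      show pvComb (pvMinYear (ys.take (ys.length / 2))) (pvMinYear (ys.drop (ys.length / 2)))
          = pvFirstMin ys
      rw [e1, e2]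
      show pvComb (pvFirstMin (ys.take (ys.length / 2))) (pvFirstMin (ys.drop (ys.length / 2)))
          = pvFirstMin ys
      rw [← pvFirstMin_append _ _ htne hdne, List.take_append_drop]

-- ===== VERDICT (by name: the statement is the Claim_ definition above) =====
theorem searchMinKey_spec : Claim_equal_searchMinKey := by
  intro myDict _hdom hpre
  obtain ⟨-, hp⟩ := hpre
  unfold Spec_searchMinKey searchMinKey searchMinKey_alt
  cases myDict with
  | nil => rfl
  | cons kv rest =>
    have hyears : (kv :: rest).map (fun kv => pvYear kv.1)
        = ((kv :: rest).map Prod.fst).map pvYear := by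
      rw [List.map_map]
      rfl
    have hB : (if (kv :: rest).map (fun kv => pvYear kv.1) = [] then "01/01/"
        else "01/01/" ++ pvMinYear ((kv :: rest).map (fun kv => pvYear kv.1)))
        = "01/01/" ++ pvFirstMin (((kv :: rest).map Prod.fst).map pvYear) := by
      rw [if_neg (by simp), hyears,
        pvMinYear_eq (((kv :: rest).map Prod.fst).map pvYear).length _ le_rfl (by simp)]
    rw [hB]
    have h0 : pvStepA "" kv.1 = pvYear kv.1 := by rw [pvStepA, if_pos rfl]
    cases rest with
    | nil =>
      show "01/01/" ++ [kv.1].foldl pvStepA "" = _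
      rw [List.foldl_cons, List.foldl_nil, h0]
      rfl
    | cons kv2 rest2 =>
      have hall : ∀ x ∈ kv :: kv2 :: rest2, PySem.Int.ofStr? (pvYear x.1) ≠ none := by
        refine hp.resolve_left ?_
        simp
      show "01/01/" ++ (kv.1 :: (kv2 :: rest2).map Prod.fst).foldl pvStepA "" = _
      rw [List.foldl_cons, h0,
        pvFoldA _ (fun k hk => by
          obtain ⟨x, hx, rfl⟩ := List.mem_map.mp hk
          exact hall x (List.mem_cons_of_mem _ hx))
          _ (hall kv List.mem_cons_self)]
      rfl
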